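-- pv_equiv track=rewrite | github.com/mmoneib/Pretext | pretext/actions/token.py | search_in_tokens
-- ===== SOURCE A (Python) =====
-- def search_in_tokens(tokens, criterion): # A barely smart fuzzy search with the aim of finding relevant tokens.
--   found=""
--   for t in tokens:
--     i = t.find(criterion)
--     if i != -1:
--       potentialFind=t
--       if found=="" or len(potentialFind) < len(found): # As there is no constant for maximum int value in Python 3. Less than because we want the most fitting find.
--         found=potentialFind
--   return found
-- ===== SOURCE B (Python) =====
-- def search_in_tokens(tokens, criterion): # sort-then-scan: stable length sort, return first token containing criterion
--   for t in sorted(tokens, key=len):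
--     if criterion in t:
--       return t
--   return ""
-- ===== Notes on version B (the rewrite author's own statement) =====
-- stated objective: alternative
-- what changed: A's single pass keeps a running minimum with a found=="" sentinel; B stably sorts the tokens by length and returns the first one containing the criterion, trading the running-minimum accumulator for sort-then-scan.
-- intended difference: When criterion is '' and tokens contains '' somewhere other than the last position, A's found=="" sentinel discards the empty-token match and A returns a longer token (e.g. 'a' on (["","a"], '')), while B returns '', the shortest token containing '' — the intended minimum. — e.g. on search_in_tokens(["", "a"], ""): A returns "a", B returns ""
import Mathlib
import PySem

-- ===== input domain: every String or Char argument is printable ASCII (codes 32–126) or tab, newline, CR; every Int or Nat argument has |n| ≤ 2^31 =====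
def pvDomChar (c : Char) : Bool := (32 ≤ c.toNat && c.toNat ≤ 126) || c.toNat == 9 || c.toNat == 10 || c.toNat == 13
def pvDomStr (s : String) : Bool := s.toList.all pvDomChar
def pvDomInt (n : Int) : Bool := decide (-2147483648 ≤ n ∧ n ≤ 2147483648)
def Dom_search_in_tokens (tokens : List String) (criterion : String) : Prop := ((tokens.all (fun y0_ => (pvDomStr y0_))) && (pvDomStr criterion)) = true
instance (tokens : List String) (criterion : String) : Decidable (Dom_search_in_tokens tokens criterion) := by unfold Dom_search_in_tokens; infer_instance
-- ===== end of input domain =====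

-- B replaces A's sentinel-based running-minimum pass by a stable length-sort followed by a scan for the
-- first containing token ('alternative' decomposition); B also returns the empty token where A's ""-sentinel drops it (see D_).


-- ===== PORT A =====
def search_in_tokens (tokens : List String) (criterion : String) : String :=
  tokens.foldl (fun found t =>
    if PySem.Str.find t criterion ≠ -1 then
      if found = "" ∨ PySem.Str.len t < PySem.Str.len found then t else found
    else found) ""

-- ===== PORT B =====
-- first token of l containing criterion (the 'return t' scan of Source B), "" if none
def firstContaining (criterion : String) : List String → String
  | [] => ""
  | t :: rest => if PySem.Str.isIn criterion t then t else firstContaining criterion rest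

def search_in_tokens_alt (tokens : List String) (criterion : String) : String :=
  firstContaining criterion (PySem.List.sorted tokens (fun t => PySem.Str.len t))

-- ===== PRECONDITION & SPEC =====
-- When criterion is "" and tokens contains "" not in last position, A's 'found==""' sentinel silently discards
-- the empty-token match and A returns a longer token; B returns "", the shortest token containing "".
def D_search_in_tokens (tokens : List String) (criterion : String) : Prop :=
  criterion = "" ∧ "" ∈ tokens ∧ tokens.getLast? ≠ some ""
instance (tokens : List String) (criterion : String) : Decidable (D_search_in_tokens tokens criterion) := by
  unfold D_search_in_tokens; infer_instance

def Spec_search_in_tokens (tokens : List String) (criterion : String) (out : String) : Prop :=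
  ¬ D_search_in_tokens tokens criterion → out = search_in_tokens_alt tokens criterion
instance (tokens : List String) (criterion : String) (out : String) : Decidable (Spec_search_in_tokens tokens criterion out) := by
  unfold Spec_search_in_tokens; infer_instance

def pvDiffWitness_search_in_tokens : List String × String := (["", "a"], "")
def pvDiffWitnessOut_search_in_tokens : String × String := ("a", "")

-- ===== CLAIM (what is proved, stated in full; the proofs are below) =====
def Claim_unchanged_search_in_tokens : Prop := ∀ (tokens : List String) (criterion : String), Dom_search_in_tokens tokens criterion → Spec_search_in_tokens tokens criterion (search_in_tokens tokens criterion)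
def Claim_changed_search_in_tokens : Prop := Dom_search_in_tokens (pvDiffWitness_search_in_tokens.1) (pvDiffWitness_search_in_tokens.2) ∧ D_search_in_tokens (pvDiffWitness_search_in_tokens.1) (pvDiffWitness_search_in_tokens.2) ∧ search_in_tokens (pvDiffWitness_search_in_tokens.1) (pvDiffWitness_search_in_tokens.2) = pvDiffWitnessOut_search_in_tokens.1 ∧ search_in_tokens_alt (pvDiffWitness_search_in_tokens.1) (pvDiffWitness_search_in_tokens.2) = pvDiffWitnessOut_search_in_tokens.2 ∧ pvDiffWitnessOut_search_in_tokens.1 ≠ pvDiffWitnessOut_search_in_tokens.2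
def Claim_exact_search_in_tokens : Prop := ∀ (tokens : List String) (criterion : String), Dom_search_in_tokens tokens criterion → D_search_in_tokens tokens criterion → search_in_tokens tokens criterion ≠ search_in_tokens_alt tokens criterion

-- ===== LEMMAS AND PROOFS =====

-- A's loop body, named for the proofs
def stepA (criterion found t : String) : String :=
  if PySem.Str.find t criterion ≠ -1 then
    if found = "" ∨ PySem.Str.len t < PySem.Str.len found then t else found
  else found

theorem searchA_eq_foldl (tokens : List String) (criterion : String) :
    search_in_tokens tokens criterion = tokens.foldl (stepA criterion) "" := rfl

theorem stepA_of_match (criterion found t : String) (h : PySem.Str.isIn criterion t = true) :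
    stepA criterion found t =
      if found = "" ∨ PySem.Str.len t < PySem.Str.len found then t else found := by
  unfold stepA
  rw [if_pos]
  rw [ne_eq, PySem.Str.find_eq_neg_one_iff, not_not]
  exact (PySem.Str.isIn_iff_infix _ _).mp h

theorem stepA_of_not (criterion found t : String) (h : ¬ PySem.Str.isIn criterion t = true) :
    stepA criterion found t = found := by
  unfold stepA
  rw [if_neg]
  rw [ne_eq, not_not, PySem.Str.find_eq_neg_one_iff]
  intro hin
  exact h ((PySem.Str.isIn_iff_infix _ _).mpr hin)

theorem isIn_empty_left (t : String) : PySem.Str.isIn "" t = true := by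
  rw [PySem.Str.isIn_iff_infix]
  simp

theorem match_nonempty (criterion t : String) (h : PySem.Str.isIn criterion t = true)
    (hne : ¬ (criterion = "" ∧ t = "")) : t ≠ "" := by
  intro ht
  subst ht
  rw [PySem.Str.isIn_iff_infix] at h
  have hc : criterion.toList = [] := List.eq_nil_of_infix_nil (by simpa using h)
  exact hne ⟨String.toList_eq_nil_iff.mp hc, rfl⟩

theorem len_pos_of_ne_empty (s : String) (h : s ≠ "") : 0 < PySem.Str.len s := by
  rw [PySem.Str.len_eq]
  have hnil : s.toList ≠ [] := fun hn => h (String.toList_eq_nil_iff.mp hn)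
  exact_mod_cast List.length_pos_iff.mpr hnil

-- firstContaining over a cons, unfolded
theorem firstContaining_cons (criterion t : String) (rest : List String) :
    firstContaining criterion (t :: rest) =
      if PySem.Str.isIn criterion t then t else firstContaining criterion rest := rfl

-- either no element matches and the scan returns "", or the scan returns a matching member
theorem firstContaining_spec (criterion : String) (l : List String) :
    (firstContaining criterion l = "" ∧ ∀ x ∈ l, ¬ PySem.Str.isIn criterion x = true) ∨
    (firstContaining criterion l ∈ l ∧ PySem.Str.isIn criterion (firstContaining criterion l) = true) := by
  induction l with
  | nil => left; exact ⟨rfl, by simp⟩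
  | cons t rest ih =>
    by_cases h : PySem.Str.isIn criterion t = true
    · right
      rw [firstContaining_cons, if_pos h]
      exact ⟨List.mem_cons_self, h⟩
    · rw [firstContaining_cons, if_neg h]
      rcases ih with ⟨h1, h2⟩ | ⟨h1, h2⟩
      · left
        refine ⟨h1, ?_⟩
        intro x hx
        rcases List.mem_cons.mp hx with rfl | hx'
        · exact h
        · exact h2 x hx'
      · right
        exact ⟨List.mem_cons_of_mem _ h1, h2⟩

-- the key step: inserting t into a length-sorted list s commutes firstContaining with A's loop body,
-- provided no matching element of s is ""
theorem firstContaining_insertBy (criterion t : String) (s : List String)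
    (hs : s.Pairwise (fun a b => PySem.Str.len a ≤ PySem.Str.len b))
    (hne : ∀ x ∈ s, PySem.Str.isIn criterion x = true → x ≠ "") :
    firstContaining criterion
        (PySem.List.insertBy (fun a b => decide (PySem.Str.len a < PySem.Str.len b)) t s)
      = stepA criterion (firstContaining criterion s) t := by
  induction s with
  | nil =>
    have h0 : PySem.List.insertBy (fun a b => decide (PySem.Str.len a < PySem.Str.len b)) t [] = [t] := rfl
    by_cases ht : PySem.Str.isIn criterion t = true
    · rw [h0, firstContaining_cons, if_pos ht]
      show t = stepA criterion "" t
      rw [stepA_of_match _ _ _ ht, if_pos (Or.inl rfl)]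
    · rw [h0, firstContaining_cons, if_neg ht]
      show "" = stepA criterion "" t
      rw [stepA_of_not _ _ _ ht]
  | cons y ys ih =>
    have hyys : ∀ z ∈ ys, PySem.Str.len y ≤ PySem.Str.len z := (List.pairwise_cons.mp hs).1
    have hb : PySem.List.insertBy (fun a b => decide (PySem.Str.len a < PySem.Str.len b)) t (y :: ys)
        = if decide (PySem.Str.len t < PySem.Str.len y) then t :: y :: ys
          else y :: PySem.List.insertBy (fun a b => decide (PySem.Str.len a < PySem.Str.len b)) t ys := rfl
    by_cases hlt : PySem.Str.len t < PySem.Str.len y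
    · -- t is inserted in front of y
      have hins : PySem.List.insertBy (fun a b => decide (PySem.Str.len a < PySem.Str.len b)) t (y :: ys)
          = t :: y :: ys := by rw [hb, if_pos (decide_eq_true hlt)]
      rw [hins, firstContaining_cons]
      by_cases ht : PySem.Str.isIn criterion t = true
      · rw [if_pos ht, stepA_of_match _ _ _ ht]
        rcases firstContaining_spec criterion (y :: ys) with ⟨h1, _⟩ | ⟨h1, _⟩
        · rw [h1, if_pos (Or.inl rfl)]
        · -- the current best is a member of y :: ys, so it is at least as long as y, hence longer than t
          have hm : PySem.Str.len y ≤ PySem.Str.len (firstContaining criterion (y :: ys)) := by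
            rcases List.mem_cons.mp h1 with heq | hmem
            · rw [heq]
            · exact hyys _ hmem
          rw [if_pos (Or.inr (lt_of_lt_of_le hlt hm))]
      · rw [if_neg ht, stepA_of_not _ _ _ ht]
    · -- t goes somewhere after y
      have hins : PySem.List.insertBy (fun a b => decide (PySem.Str.len a < PySem.Str.len b)) t (y :: ys)
          = y :: PySem.List.insertBy (fun a b => decide (PySem.Str.len a < PySem.Str.len b)) t ys := by
        rw [hb, if_neg (by simpa only [decide_eq_true_eq] using hlt)]
      rw [hins, firstContaining_cons, firstContaining_cons]
      by_cases hy : PySem.Str.isIn criterion y = true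
      · -- y matches: it stays the answer on both sides (t is not strictly shorter)
        rw [if_pos hy, if_pos hy]
        have hy' : y ≠ "" := hne y List.mem_cons_self hy
        by_cases ht : PySem.Str.isIn criterion t = true
        · rw [stepA_of_match _ _ _ ht, if_neg]
          rintro (h1 | h2)
          · exact hy' h1
          · exact hlt h2
        · rw [stepA_of_not _ _ _ ht]
      · rw [if_neg hy, if_neg hy]
        exact ih (List.pairwise_cons.mp hs).2 (fun x hx => hne x (List.mem_cons_of_mem _ hx))

-- main-case equivalence: if no matching token is "", A's fold equals B's sort-then-scan
theorem main_case (criterion : String) (l : List String)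
    (hne : ∀ x ∈ l, PySem.Str.isIn criterion x = true → x ≠ "") :
    l.foldl (stepA criterion) "" =
      firstContaining criterion (PySem.List.sorted l (fun t => PySem.Str.len t)) := by
  induction l using List.reverseRecOn with
  | nil => rfl
  | append_singleton l' t ih =>
    rw [PySem.List.sorted_eq_foldl_insertBy, List.foldl_append, List.foldl_append,
      ← PySem.List.sorted_eq_foldl_insertBy]
    simp only [List.foldl_cons, List.foldl_nil]
    rw [firstContaining_insertBy criterion t _
        (PySem.List.sorted_pairwise l' (fun t => PySem.Str.len t))
        (fun x hx => hne x (List.mem_append_left _ ((PySem.List.mem_sorted _ _ _ _).mp hx))),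
      ← ih (fun x hx => hne x (List.mem_append_left _ hx))]

-- with empty criterion, B returns "" as soon as "" ∈ tokens
theorem alt_empty (tokens : List String) (h : "" ∈ tokens) :
    search_in_tokens_alt tokens "" = "" := by
  unfold search_in_tokens_alt
  have hnil : tokens ≠ [] := List.ne_nil_of_mem h
  have hs : PySem.List.sorted tokens (fun t => PySem.Str.len t) ≠ [] := by
    intro hc; exact hnil ((PySem.List.sorted_eq_nil_iff _ _ _).mp hc)
  obtain ⟨m, rest, hm⟩ := List.exists_cons_of_ne_nil hs
  have hle : PySem.Str.len m ≤ PySem.Str.len "" :=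
    PySem.List.key_head_sorted_le _ _ hm "" h
  have hm0 : m = "" := by
    have h0 : PySem.Str.len "" = 0 := rfl
    rw [PySem.Str.len_eq, h0] at hle
    have hlen : m.toList.length = 0 := by exact_mod_cast le_antisymm hle (by positivity)
    exact String.toList_eq_nil_iff.mp (List.length_eq_zero_iff.mp hlen)
  rw [hm, firstContaining_cons, if_pos (isIn_empty_left m), hm0]

-- with empty criterion, A's step never returns "" on a nonempty token
theorem stepA_empty_ne (found t : String) (ht : t ≠ "") : stepA "" found t ≠ "" := by
  rw [stepA_of_match _ _ _ (isIn_empty_left t)]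
  by_cases h : found = "" ∨ PySem.Str.len t < PySem.Str.len found
  · rw [if_pos h]; exact ht
  · rw [if_neg h]; intro hc; exact h (Or.inl hc)

-- with empty criterion, A's step on the token "" always returns ""
theorem stepA_empty_empty (found : String) : stepA "" found "" = "" := by
  rw [stepA_of_match _ _ _ (isIn_empty_left "")]
  by_cases h : found = ""
  · rw [if_pos (Or.inl h)]
  · have hlt : PySem.Str.len "" < PySem.Str.len found := by
      have h0 : PySem.Str.len "" = 0 := rfl
      rw [h0]
      exact len_pos_of_ne_empty found h
    rw [if_pos (Or.inr hlt)]

-- ===== VERDICT (by name: the statement is the Claim_ definition above) =====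
theorem search_in_tokens_spec : Claim_unchanged_search_in_tokens := by
  intro tokens criterion _ hnd
  unfold D_search_in_tokens at hnd
  by_cases hmain : criterion = "" ∧ "" ∈ tokens
  · -- then the last token must be "" : both sides return ""
    obtain ⟨hc, hmem⟩ := hmain
    subst hc
    have hlast : tokens.getLast? = some "" := by
      by_contra hL
      exact hnd ⟨rfl, hmem, hL⟩
    have hnil : tokens ≠ [] := List.ne_nil_of_mem hmem
    have hg : tokens.getLast hnil = "" := by
      rw [List.getLast?_eq_some_getLast hnil] at hlast
      exact Option.some_inj.mp hlast
    obtain ⟨l', hl'⟩ : ∃ l', tokens = l' ++ [""] :=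
      ⟨tokens.dropLast, by rw [← hg]; exact (List.dropLast_append_getLast hnil).symm⟩
    rw [searchA_eq_foldl, alt_empty tokens hmem, hl', List.foldl_append]
    simp only [List.foldl_cons, List.foldl_nil]
    exact stepA_empty_empty _
  · -- main case: no matching token is ""
    rw [searchA_eq_foldl]
    unfold search_in_tokens_alt
    exact main_case criterion tokens (fun x hx h => match_nonempty criterion x h
      (fun ⟨h1, h2⟩ => hmain ⟨h1, h2 ▸ hx⟩))

theorem search_in_tokens_changed : Claim_changed_search_in_tokens := by
  unfold Claim_changed_search_in_tokens; decide

theorem search_in_tokens_tight : Claim_exact_search_in_tokens := by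
  intro tokens criterion _ hd
  obtain ⟨hc, hmem, hlast⟩ := hd
  subst hc
  rw [alt_empty tokens hmem, searchA_eq_foldl]
  have hnil : tokens ≠ [] := List.ne_nil_of_mem hmem
  have hl' : tokens = tokens.dropLast ++ [tokens.getLast hnil] :=
    (List.dropLast_append_getLast hnil).symm
  have ht : tokens.getLast hnil ≠ "" := by
    intro hteq
    apply hlast
    rw [List.getLast?_eq_some_getLast hnil, hteq]
  rw [hl', List.foldl_append]
  simp only [List.foldl_cons, List.foldl_nil]
  exact stepA_empty_ne _ _ ht
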